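-- pv_equiv track=rewrite | github.com/ufal/factgenie | factgenie/datasets/rotowire_shared_task.py | add_explanations
-- ===== SOURCE A (Python) =====
-- def add_explanations(html):
--     abbr_mappings = {
--         "Minutes": "The number of minutes played",
--         "Points": "Total points scored",
--         "Rebounds": "Total rebounds (offensive + defensive)",
--         "Assists": "Passes that directly lead to a made basket",
--         "Field Goals": "Shows makes/attempts for all shots except free throws",
--         "Three Pointers": "Shows makes/attempts for shots beyond the three-point line",
--         "Free Throws": "Shows makes/attempts for uncontested shots awarded after a foul",
--         "Steals": "Number of times the player took the ball from the opposing team",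
--         "Blocks": "Number of opponents' shots that were blocked",
--         "Turnovers": "Number of times the player lost the ball to the opposing team",
--         "Field Goal Percentage": "The percentage of shots made (excluding free throws)",
--         "Three Point Percentage": "The percentage of three-point shots made",
--         "Free Throw Percentage": "The percentage of free throws made",
--     }
--
--     for term, explanation in abbr_mappings.items():
--         html = html.replace(term, f'<abbr title="{explanation}">{term}</abbr>')
--
--     return html
-- ===== SOURCE B (Python) =====
-- def add_explanations(html):
--     abbr_mappings = {
--         "Minutes": "The number of minutes played",
--         "Points": "Total points scored",
--         "Rebounds": "Total rebounds (offensive + defensive)",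
--         "Assists": "Passes that directly lead to a made basket",
--         "Field Goals": "Shows makes/attempts for all shots except free throws",
--         "Three Pointers": "Shows makes/attempts for shots beyond the three-point line",
--         "Free Throws": "Shows makes/attempts for uncontested shots awarded after a foul",
--         "Steals": "Number of times the player took the ball from the opposing team",
--         "Blocks": "Number of opponents' shots that were blocked",
--         "Turnovers": "Number of times the player lost the ball to the opposing team",
--         "Field Goal Percentage": "The percentage of shots made (excluding free throws)",
--         "Three Point Percentage": "The percentage of three-point shots made",
--         "Free Throw Percentage": "The percentage of free throws made",
--     }
--     pairs = [(term, f'<abbr title="{explanation}">{term}</abbr>')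
--              for term, explanation in abbr_mappings.items()]
--
--     # One left-to-right scan: at each position wrap the first term that starts
--     # there, otherwise copy the character.  (No term overlaps another, so this
--     # equals the 13 sequential full-string replace passes.)
--     out = []
--     i = 0
--     n = len(html)
--     while i < n:
--         for term, wrapped in pairs:
--             if html.startswith(term, i):
--                 out.append(wrapped)
--                 i += len(term)
--                 break
--         else:
--             out.append(html[i])
--             i += 1
--     return ''.join(out)
-- ===== Notes on version B (the rewrite author's own statement) =====
-- stated objective: alternative
-- what changed: A makes 13 sequential full-string replace passes (one per stat term, each rescanning its own previous output); B makes a single left-to-right scan that at each position wraps the first term starting there (safe because no term overlaps, prefixes or occurs inside another term's wrapped text), building the result in one pass.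
import Mathlib
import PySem

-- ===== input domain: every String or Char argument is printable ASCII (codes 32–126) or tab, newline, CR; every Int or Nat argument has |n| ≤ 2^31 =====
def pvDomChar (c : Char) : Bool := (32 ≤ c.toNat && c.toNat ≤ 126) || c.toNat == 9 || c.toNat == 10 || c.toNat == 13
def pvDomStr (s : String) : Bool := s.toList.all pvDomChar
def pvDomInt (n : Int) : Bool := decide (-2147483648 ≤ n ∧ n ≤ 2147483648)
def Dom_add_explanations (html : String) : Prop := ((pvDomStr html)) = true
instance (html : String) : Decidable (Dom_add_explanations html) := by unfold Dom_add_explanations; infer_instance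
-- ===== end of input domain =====

-- B replaces A's 13 sequential full-string replace passes by one left-to-right scan that
-- wraps the first term matching at each position (alternative decomposition, same output).

-- ===== PORT A =====
def abbrMappingsA : List (String × String) :=
  [("Minutes", "The number of minutes played"),
   ("Points", "Total points scored"),
   ("Rebounds", "Total rebounds (offensive + defensive)"),
   ("Assists", "Passes that directly lead to a made basket"),
   ("Field Goals", "Shows makes/attempts for all shots except free throws"),
   ("Three Pointers", "Shows makes/attempts for shots beyond the three-point line"),
   ("Free Throws", "Shows makes/attempts for uncontested shots awarded after a foul"),
   ("Steals", "Number of times the player took the ball from the opposing team"),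
   ("Blocks", "Number of opponents' shots that were blocked"),
   ("Turnovers", "Number of times the player lost the ball to the opposing team"),
   ("Field Goal Percentage", "The percentage of shots made (excluding free throws)"),
   ("Three Point Percentage", "The percentage of three-point shots made"),
   ("Free Throw Percentage", "The percentage of free throws made")]

-- A: for term, explanation in abbr_mappings.items(): html = html.replace(term, f'<abbr title="{explanation}">{term}</abbr>')
def add_explanations (html : String) : String :=
  List.foldl
    (fun h p => PySem.Str.replace h p.1 ("<abbr title=\"" ++ p.2 ++ "\">" ++ p.1 ++ "</abbr>"))
    html abbrMappingsA

-- ===== PORT B =====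
-- B's precomputed (term, wrapped) table
def pairsStr : List (String × String) :=
  [("Minutes",
    "<abbr title=\"The number of minutes played\">Minutes</abbr>"),
   ("Points",
    "<abbr title=\"Total points scored\">Points</abbr>"),
   ("Rebounds",
    "<abbr title=\"Total rebounds (offensive + defensive)\">Rebounds</abbr>"),
   ("Assists",
    "<abbr title=\"Passes that directly lead to a made basket\">Assists</abbr>"),
   ("Field Goals",
    "<abbr title=\"Shows makes/attempts for all shots except free throws\">Field Goals</abbr>"),
   ("Three Pointers",
    "<abbr title=\"Shows makes/attempts for shots beyond the three-point line\">Three Pointers</abbr>"),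
   ("Free Throws",
    "<abbr title=\"Shows makes/attempts for uncontested shots awarded after a foul\">Free Throws</abbr>"),
   ("Steals",
    "<abbr title=\"Number of times the player took the ball from the opposing team\">Steals</abbr>"),
   ("Blocks",
    "<abbr title=\"Number of opponents' shots that were blocked\">Blocks</abbr>"),
   ("Turnovers",
    "<abbr title=\"Number of times the player lost the ball to the opposing team\">Turnovers</abbr>"),
   ("Field Goal Percentage",
    "<abbr title=\"The percentage of shots made (excluding free throws)\">Field Goal Percentage</abbr>"),
   ("Three Point Percentage",
    "<abbr title=\"The percentage of three-point shots made\">Three Point Percentage</abbr>"),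
   ("Free Throw Percentage",
    "<abbr title=\"The percentage of free throws made\">Free Throw Percentage</abbr>")]

-- pairs on code points
def pairsB : List (List Char × List Char) :=
  pairsStr.map (fun p => (p.1.toList, p.2.toList))

-- needed by scanB's termination: every term is nonempty
theorem pairsB_fst_ne_nil : ∀ p ∈ pairsB, p.1 ≠ [] := by decide

-- B's while loop: at each position wrap the first matching term, else copy the character
def scanB : List Char → List Char
  | [] => []
  | c :: s =>
    match _h : pairsB.find? (fun p => p.1.isPrefixOf (c :: s)) with
    | some p => p.2 ++ scanB ((c :: s).drop p.1.length)
    | none => c :: scanB s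
termination_by s => s.length
decreasing_by
  · have hm : p ∈ pairsB := List.mem_of_find?_eq_some _h
    have hne : p.1 ≠ [] := pairsB_fst_ne_nil p hm
    have h1 : 0 < p.1.length := List.length_pos_iff.mpr hne
    simp only [List.length_drop, List.length_cons]
    omega
  · simp

def add_explanations_alt (html : String) : String :=
  String.ofList (scanB html.toList)

-- ===== PRECONDITION & SPEC =====
def Spec_add_explanations (html : String) (out : String) : Prop := out = add_explanations_alt html
instance (html : String) (out : String) : Decidable (Spec_add_explanations html out) := by unfold Spec_add_explanations; infer_instance

-- ===== CLAIM (what is proved, stated in full; the proofs are below) =====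
def Claim_equal_add_explanations : Prop := ∀ (html : String), Dom_add_explanations html → Spec_add_explanations html (add_explanations html)

-- ===== LEMMAS AND PROOFS =====

-- structural form of Python's str.replace (leftmost, non-overlapping), agreeing for nonempty pattern
def rep (t w : List Char) : List Char → List Char
  | [] => []
  | c :: s =>
    if _ht : t ≠ [] ∧ t.isPrefixOf (c :: s) then w ++ rep t w (s.drop (t.length - 1))
    else c :: rep t w s
termination_by s => s.length
decreasing_by
  · simp only [List.length_drop, List.length_cons]; omega
  · simp

-- the fold both halves of the proof talk about
def repFold (s : List Char) (ps : List (List Char × List Char)) : List Char :=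
  List.foldl (fun h p => rep p.1 p.2 h) s ps

theorem rep_nil (t w : List Char) : rep t w [] = [] := by rw [rep]

theorem rep_cons_pos (t w : List Char) (c : Char) (s : List Char)
    (hne : t ≠ []) (h : t <+: (c :: s)) :
    rep t w (c :: s) = w ++ rep t w (s.drop (t.length - 1)) := by
  rw [rep, dif_pos ⟨hne, by simpa [List.isPrefixOf_iff_prefix] using h⟩]

theorem rep_cons_neg (t w : List Char) (c : Char) (s : List Char)
    (h : ¬ (t ≠ [] ∧ t <+: (c :: s))) : rep t w (c :: s) = c :: rep t w s := by
  rw [rep, dif_neg (by simpa [List.isPrefixOf_iff_prefix] using h)]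

theorem rep_head_match (t w Z : List Char) (ht : t ≠ []) :
    rep t w (t ++ Z) = w ++ rep t w Z := by
  obtain ⟨d, t', rfl⟩ := List.exists_cons_of_ne_nil ht
  show rep (d :: t') w (d :: (t' ++ Z)) = _
  rw [rep_cons_pos _ _ _ _ (by simp) (by simp [List.cons_prefix_cons])]
  congr 1
  simp

theorem go_eq (old new : List Char) (hne : old ≠ []) :
    ∀ (fuel : Nat) (s acc : List Char), s.length ≤ fuel →
    PySem.Chars.replace.go old new fuel s acc = acc.reverse ++ rep old new s := by
  intro fuel
  induction fuel with
  | zero =>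
    intro s acc hs
    have hs0 : s = [] := by cases s with
      | nil => rfl
      | cons a b => simp at hs
    subst hs0
    rw [PySem.Chars.replace.go, rep_nil]
  | succ n ih =>
    intro s acc hs
    cases s with
    | nil => rw [PySem.Chars.replace.go, rep_nil] <;> simp
    | cons c s' =>
      rw [PySem.Chars.replace.go]
      by_cases hp : old.isPrefixOf (c :: s') = true
      · rw [if_pos hp]
        have holen : 0 < old.length := List.length_pos_iff.mpr hne
        have hd : (c :: s').drop old.length = s'.drop (old.length - 1) := by
          obtain ⟨k, hk⟩ : ∃ k, old.length = k + 1 := ⟨old.length - 1, by omega⟩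
          rw [hk]; simp
        rw [ih ((c :: s').drop old.length) (new.reverse ++ acc)
              (by
                have h2 : s'.length + 1 ≤ n + 1 := by simpa using hs
                simp only [List.length_drop, List.length_cons]
                omega)]
        rw [rep_cons_pos _ _ _ _ hne (List.isPrefixOf_iff_prefix.mp hp), hd]
        simp
      · rw [if_neg hp]
        rw [ih s' (c :: acc) (by simpa using Nat.le_of_succ_le_succ (by simpa using hs))]
        rw [rep_cons_neg _ _ _ _ (fun hc => hp (List.isPrefixOf_iff_prefix.mpr hc.2))]
        simp

theorem replace_eq_rep (s old new : List Char) (h : old ≠ []) :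
    PySem.Chars.replace s old new = rep old new s := by
  rw [PySem.Chars.replace, if_neg (by simpa [List.isEmpty_iff] using h)]
  simpa using go_eq old new h s.length s [] le_rfl

-- a prefix of a replace result that contains no '<' was already a prefix of the input
theorem prefix_reflect (t w : List Char) (hw : w.head? = some '<') :
    ∀ (n : Nat) (s u : List Char), s.length ≤ n → u ≠ [] → '<' ∉ u →
    u <+: rep t w s → u <+: s := by
  intro n
  induction n with
  | zero =>
    intro s u hs hu _ hp
    cases s with
    | nil => rw [rep_nil] at hp; exact absurd (List.prefix_nil.mp hp) hu
    | cons a b => simp at hs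
  | succ n ih =>
    intro s u hs hu hlt hp
    cases s with
    | nil => rw [rep_nil] at hp; exact absurd (List.prefix_nil.mp hp) hu
    | cons c s' =>
      by_cases hc : t ≠ [] ∧ t <+: (c :: s')
      · rw [rep_cons_pos _ _ _ _ hc.1 hc.2] at hp
        obtain ⟨d, u', rfl⟩ := List.exists_cons_of_ne_nil hu
        obtain ⟨r, hr⟩ := hp
        cases w with
        | nil => simp at hw
        | cons w0 w' =>
          have hw0 : w0 = '<' := by simpa using hw
          have hd : d = w0 := by
            have := congrArg List.head? hr
            simpa using this
          exact absurd (by simp [hd, hw0]) hlt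
      · rw [rep_cons_neg _ _ _ _ hc] at hp
        obtain ⟨d, u', rfl⟩ := List.exists_cons_of_ne_nil hu
        rw [List.cons_prefix_cons] at hp
        obtain ⟨rfl, hu'⟩ := hp
        by_cases h0 : u' = []
        · subst h0; simp [List.cons_prefix_cons]
        · have := ih s' u' (by simpa using Nat.le_of_succ_le_succ (by simpa using hs)) h0
            (fun hm => hlt (List.mem_cons_of_mem _ hm)) hu'
          exact List.cons_prefix_cons.mpr ⟨rfl, this⟩

theorem prefix_append_cases {u a b : List Char} (h : u <+: a ++ b) : u <+: a ∨ a <+: u :=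
  List.prefix_or_prefix_of_prefix h (List.prefix_append a b)

-- rep leaves a segment untouched if the pattern can start nowhere inside it
theorem rep_segment (t w : List Char) :
    ∀ (u Z : List Char), (∀ k, k < u.length → ¬ t <+: u.drop k ∧ ¬ u.drop k <+: t) →
    rep t w (u ++ Z) = u ++ rep t w Z := by
  intro u
  induction u with
  | nil => intro Z _; simp
  | cons a u' iu =>
    intro Z H
    have H0 := H 0 (by simp)
    simp only [List.drop_zero] at H0
    have hcond : ¬ (t ≠ [] ∧ t <+: ((a :: u') ++ Z)) := by
      rintro ⟨-, hpre⟩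
      rcases prefix_append_cases hpre with h | h
      · exact H0.1 h
      · exact H0.2 h
    show rep t w (a :: (u' ++ Z)) = _
    rw [rep_cons_neg _ _ _ _ (by simpa using hcond)]
    rw [iu Z (fun k hk => by simpa using H (k + 1) (by simpa using Nat.succ_lt_succ hk))]
    rfl

theorem repFold_cons (s : List Char) (p : List Char × List Char)
    (ps : List (List Char × List Char)) :
    repFold s (p :: ps) = repFold (rep p.1 p.2 s) ps := by
  simp [repFold]

theorem repFold_append (s : List Char) (xs ys : List (List Char × List Char)) :
    repFold s (xs ++ ys) = repFold (repFold s xs) ys := by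
  simp [repFold, List.foldl_append]

theorem fold_segment :
    ∀ (ps : List (List Char × List Char)) (u Z : List Char),
    (∀ p ∈ ps, p.1 ≠ [] ∧ ∀ k, k < u.length → ¬ p.1 <+: u.drop k ∧ ¬ u.drop k <+: p.1) →
    repFold (u ++ Z) ps = u ++ repFold Z ps := by
  intro ps
  induction ps with
  | nil => intro u Z _; simp [repFold]
  | cons p ps ih =>
    intro u Z H
    have hp := H p (List.mem_cons_self ..)
    rw [repFold_cons, rep_segment p.1 p.2 u Z hp.2,
        ih u (rep p.1 p.2 Z) (fun q hq => H q (List.mem_cons_of_mem _ hq)), repFold_cons]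

theorem fold_nil : ∀ ps : List (List Char × List Char), repFold [] ps = [] := by
  intro ps
  induction ps with
  | nil => rfl
  | cons p ps ih => rw [repFold_cons, rep_nil, ih]

theorem fold_head :
    ∀ (ps : List (List Char × List Char)) (c : Char) (s : List Char),
    (∀ p ∈ ps, p.1 ≠ [] ∧ '<' ∉ p.1 ∧ p.2.head? = some '<' ∧ ¬ p.1 <+: (c :: s)) →
    repFold (c :: s) ps = c :: repFold s ps := by
  intro ps
  induction ps with
  | nil => intro c s _; rfl
  | cons p ps ih =>
    intro c s H
    have hp := H p (List.mem_cons_self ..)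
    have hstep : rep p.1 p.2 (c :: s) = c :: rep p.1 p.2 s :=
      rep_cons_neg _ _ _ _ (fun hc => hp.2.2.2 hc.2)
    rw [repFold_cons, hstep, ih c (rep p.1 p.2 s) ?_, repFold_cons]
    intro q hq
    have hqf := H q (List.mem_cons_of_mem _ hq)
    refine ⟨hqf.1, hqf.2.1, hqf.2.2.1, fun hcontra => ?_⟩
    have : q.1 <+: rep p.1 p.2 (c :: s) := by rw [hstep]; exact hcontra
    exact hqf.2.2.2
      (prefix_reflect p.1 p.2 hp.2.2.1 (c :: s).length (c :: s) q.1 le_rfl hqf.1 hqf.2.1 this)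

-- the 13 (term, wrapped) pairs as plain character-list literals (proof-side only)
def pairsL : List (List Char × List Char) :=
[  (['M', 'i', 'n', 'u', 't', 'e', 's'],
   ['<', 'a', 'b', 'b', 'r', ' ', 't', 'i', 't', 'l', 'e', '=', '"', 'T', 'h', 'e', ' ', 'n', 'u', 'm', 'b', 'e', 'r', ' ', 'o', 'f', ' ', 'm', 'i', 'n', 'u', 't', 'e', 's', ' ', 'p', 'l', 'a', 'y', 'e', 'd', '"', '>', 'M', 'i', 'n', 'u', 't', 'e', 's', '<', '/', 'a', 'b', 'b', 'r', '>']),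
  (['P', 'o', 'i', 'n', 't', 's'],
   ['<', 'a', 'b', 'b', 'r', ' ', 't', 'i', 't', 'l', 'e', '=', '"', 'T', 'o', 't', 'a', 'l', ' ', 'p', 'o', 'i', 'n', 't', 's', ' ', 's', 'c', 'o', 'r', 'e', 'd', '"', '>', 'P', 'o', 'i', 'n', 't', 's', '<', '/', 'a', 'b', 'b', 'r', '>']),
  (['R', 'e', 'b', 'o', 'u', 'n', 'd', 's'],
   ['<', 'a', 'b', 'b', 'r', ' ', 't', 'i', 't', 'l', 'e', '=', '"', 'T', 'o', 't', 'a', 'l', ' ', 'r', 'e', 'b', 'o', 'u', 'n', 'd', 's', ' ', '(', 'o', 'f', 'f', 'e', 'n', 's', 'i', 'v', 'e', ' ', '+', ' ', 'd', 'e', 'f', 'e', 'n', 's', 'i', 'v', 'e', ')', '"', '>', 'R', 'e', 'b', 'o', 'u', 'n', 'd', 's', '<', '/', 'a', 'b', 'b', 'r', '>']),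
  (['A', 's', 's', 'i', 's', 't', 's'],
   ['<', 'a', 'b', 'b', 'r', ' ', 't', 'i', 't', 'l', 'e', '=', '"', 'P', 'a', 's', 's', 'e', 's', ' ', 't', 'h', 'a', 't', ' ', 'd', 'i', 'r', 'e', 'c', 't', 'l', 'y', ' ', 'l', 'e', 'a', 'd', ' ', 't', 'o', ' ', 'a', ' ', 'm', 'a', 'd', 'e', ' ', 'b', 'a', 's', 'k', 'e', 't', '"', '>', 'A', 's', 's', 'i', 's', 't', 's', '<', '/', 'a', 'b', 'b', 'r', '>']),
  (['F', 'i', 'e', 'l', 'd', ' ', 'G', 'o', 'a', 'l', 's'],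
   ['<', 'a', 'b', 'b', 'r', ' ', 't', 'i', 't', 'l', 'e', '=', '"', 'S', 'h', 'o', 'w', 's', ' ', 'm', 'a', 'k', 'e', 's', '/', 'a', 't', 't', 'e', 'm', 'p', 't', 's', ' ', 'f', 'o', 'r', ' ', 'a', 'l', 'l', ' ', 's', 'h', 'o', 't', 's', ' ', 'e', 'x', 'c', 'e', 'p', 't', ' ', 'f', 'r', 'e', 'e', ' ', 't', 'h', 'r', 'o', 'w', 's', '"', '>', 'F', 'i', 'e', 'l', 'd', ' ', 'G', 'o', 'a', 'l', 's', '<', '/', 'a', 'b', 'b', 'r', '>']),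
  (['T', 'h', 'r', 'e', 'e', ' ', 'P', 'o', 'i', 'n', 't', 'e', 'r', 's'],
   ['<', 'a', 'b', 'b', 'r', ' ', 't', 'i', 't', 'l', 'e', '=', '"', 'S', 'h', 'o', 'w', 's', ' ', 'm', 'a', 'k', 'e', 's', '/', 'a', 't', 't', 'e', 'm', 'p', 't', 's', ' ', 'f', 'o', 'r', ' ', 's', 'h', 'o', 't', 's', ' ', 'b', 'e', 'y', 'o', 'n', 'd', ' ', 't', 'h', 'e', ' ', 't', 'h', 'r', 'e', 'e', '-', 'p', 'o', 'i', 'n', 't', ' ', 'l', 'i', 'n', 'e', '"', '>', 'T', 'h', 'r', 'e', 'e', ' ', 'P', 'o', 'i', 'n', 't', 'e', 'r', 's', '<', '/', 'a', 'b', 'b', 'r', '>']),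
  (['F', 'r', 'e', 'e', ' ', 'T', 'h', 'r', 'o', 'w', 's'],
   ['<', 'a', 'b', 'b', 'r', ' ', 't', 'i', 't', 'l', 'e', '=', '"', 'S', 'h', 'o', 'w', 's', ' ', 'm', 'a', 'k', 'e', 's', '/', 'a', 't', 't', 'e', 'm', 'p', 't', 's', ' ', 'f', 'o', 'r', ' ', 'u', 'n', 'c', 'o', 'n', 't', 'e', 's', 't', 'e', 'd', ' ', 's', 'h', 'o', 't', 's', ' ', 'a', 'w', 'a', 'r', 'd', 'e', 'd', ' ', 'a', 'f', 't', 'e', 'r', ' ', 'a', ' ', 'f', 'o', 'u', 'l', '"', '>', 'F', 'r', 'e', 'e', ' ', 'T', 'h', 'r', 'o', 'w', 's', '<', '/', 'a', 'b', 'b', 'r', '>']),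
  (['S', 't', 'e', 'a', 'l', 's'],
   ['<', 'a', 'b', 'b', 'r', ' ', 't', 'i', 't', 'l', 'e', '=', '"', 'N', 'u', 'm', 'b', 'e', 'r', ' ', 'o', 'f', ' ', 't', 'i', 'm', 'e', 's', ' ', 't', 'h', 'e', ' ', 'p', 'l', 'a', 'y', 'e', 'r', ' ', 't', 'o', 'o', 'k', ' ', 't', 'h', 'e', ' ', 'b', 'a', 'l', 'l', ' ', 'f', 'r', 'o', 'm', ' ', 't', 'h', 'e', ' ', 'o', 'p', 'p', 'o', 's', 'i', 'n', 'g', ' ', 't', 'e', 'a', 'm', '"', '>', 'S', 't', 'e', 'a', 'l', 's', '<', '/', 'a', 'b', 'b', 'r', '>']),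
  (['B', 'l', 'o', 'c', 'k', 's'],
   ['<', 'a', 'b', 'b', 'r', ' ', 't', 'i', 't', 'l', 'e', '=', '"', 'N', 'u', 'm', 'b', 'e', 'r', ' ', 'o', 'f', ' ', 'o', 'p', 'p', 'o', 'n', 'e', 'n', 't', 's', '\'', ' ', 's', 'h', 'o', 't', 's', ' ', 't', 'h', 'a', 't', ' ', 'w', 'e', 'r', 'e', ' ', 'b', 'l', 'o', 'c', 'k', 'e', 'd', '"', '>', 'B', 'l', 'o', 'c', 'k', 's', '<', '/', 'a', 'b', 'b', 'r', '>']),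
  (['T', 'u', 'r', 'n', 'o', 'v', 'e', 'r', 's'],
   ['<', 'a', 'b', 'b', 'r', ' ', 't', 'i', 't', 'l', 'e', '=', '"', 'N', 'u', 'm', 'b', 'e', 'r', ' ', 'o', 'f', ' ', 't', 'i', 'm', 'e', 's', ' ', 't', 'h', 'e', ' ', 'p', 'l', 'a', 'y', 'e', 'r', ' ', 'l', 'o', 's', 't', ' ', 't', 'h', 'e', ' ', 'b', 'a', 'l', 'l', ' ', 't', 'o', ' ', 't', 'h', 'e', ' ', 'o', 'p', 'p', 'o', 's', 'i', 'n', 'g', ' ', 't', 'e', 'a', 'm', '"', '>', 'T', 'u', 'r', 'n', 'o', 'v', 'e', 'r', 's', '<', '/', 'a', 'b', 'b', 'r', '>']),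
  (['F', 'i', 'e', 'l', 'd', ' ', 'G', 'o', 'a', 'l', ' ', 'P', 'e', 'r', 'c', 'e', 'n', 't', 'a', 'g', 'e'],
   ['<', 'a', 'b', 'b', 'r', ' ', 't', 'i', 't', 'l', 'e', '=', '"', 'T', 'h', 'e', ' ', 'p', 'e', 'r', 'c', 'e', 'n', 't', 'a', 'g', 'e', ' ', 'o', 'f', ' ', 's', 'h', 'o', 't', 's', ' ', 'm', 'a', 'd', 'e', ' ', '(', 'e', 'x', 'c', 'l', 'u', 'd', 'i', 'n', 'g', ' ', 'f', 'r', 'e', 'e', ' ', 't', 'h', 'r', 'o', 'w', 's', ')', '"', '>', 'F', 'i', 'e', 'l', 'd', ' ', 'G', 'o', 'a', 'l', ' ', 'P', 'e', 'r', 'c', 'e', 'n', 't', 'a', 'g', 'e', '<', '/', 'a', 'b', 'b', 'r', '>']),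
  (['T', 'h', 'r', 'e', 'e', ' ', 'P', 'o', 'i', 'n', 't', ' ', 'P', 'e', 'r', 'c', 'e', 'n', 't', 'a', 'g', 'e'],
   ['<', 'a', 'b', 'b', 'r', ' ', 't', 'i', 't', 'l', 'e', '=', '"', 'T', 'h', 'e', ' ', 'p', 'e', 'r', 'c', 'e', 'n', 't', 'a', 'g', 'e', ' ', 'o', 'f', ' ', 't', 'h', 'r', 'e', 'e', '-', 'p', 'o', 'i', 'n', 't', ' ', 's', 'h', 'o', 't', 's', ' ', 'm', 'a', 'd', 'e', '"', '>', 'T', 'h', 'r', 'e', 'e', ' ', 'P', 'o', 'i', 'n', 't', ' ', 'P', 'e', 'r', 'c', 'e', 'n', 't', 'a', 'g', 'e', '<', '/', 'a', 'b', 'b', 'r', '>']),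
  (['F', 'r', 'e', 'e', ' ', 'T', 'h', 'r', 'o', 'w', ' ', 'P', 'e', 'r', 'c', 'e', 'n', 't', 'a', 'g', 'e'],
   ['<', 'a', 'b', 'b', 'r', ' ', 't', 'i', 't', 'l', 'e', '=', '"', 'T', 'h', 'e', ' ', 'p', 'e', 'r', 'c', 'e', 'n', 't', 'a', 'g', 'e', ' ', 'o', 'f', ' ', 'f', 'r', 'e', 'e', ' ', 't', 'h', 'r', 'o', 'w', 's', ' ', 'm', 'a', 'd', 'e', '"', '>', 'F', 'r', 'e', 'e', ' ', 'T', 'h', 'r', 'o', 'w', ' ', 'P', 'e', 'r', 'c', 'e', 'n', 't', 'a', 'g', 'e', '<', '/', 'a', 'b', 'b', 'r', '>'])]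

theorem pairsL_eq : pairsB = pairsL := by decide

set_option maxRecDepth 100000 in
theorem fact_lt_not_mem : ∀ p ∈ pairsB, '<' ∉ p.1 := by rw [pairsL_eq]; decide

set_option maxRecDepth 100000 in
theorem fact_w_head : ∀ p ∈ pairsB, p.2.head? = some '<' := by rw [pairsL_eq]; decide

set_option maxRecDepth 100000 in
theorem fact_prefix_free : ∀ p ∈ pairsB, ∀ q ∈ pairsB, p.1 <+: q.1 → p.1 = q.1 := by
  rw [pairsL_eq]; decide

set_option maxRecDepth 1000000 in
set_option maxHeartbeats 2000000 in
theorem fact_overlap : ∀ p ∈ pairsB, ∀ q ∈ pairsB, ∀ k ∈ List.range q.1.length,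
    0 < k → ¬ p.1 <+: q.1.drop k ∧ ¬ q.1.drop k <+: p.1 := by
  rw [pairsL_eq]; decide

set_option maxRecDepth 1000000 in
set_option maxHeartbeats 4000000 in
theorem fact_wrap : ∀ p ∈ pairsB, ∀ q ∈ pairsB, p.1 ≠ q.1 → ∀ k ∈ List.range q.2.length,
    ¬ p.1 <+: q.2.drop k ∧ ¬ q.2.drop k <+: p.1 := by
  rw [pairsL_eq]; decide

set_option maxRecDepth 100000 in
theorem fact_nodup : (pairsB.map Prod.fst).Nodup := by rw [pairsL_eq]; decide

theorem find?_split {α : Type} (P : α → Bool) :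
    ∀ (l : List α) (a : α), l.find? P = some a →
    ∃ l1 l2, l = l1 ++ a :: l2 ∧ ∀ x ∈ l1, P x = false := by
  intro l
  induction l with
  | nil => intro a h; simp at h
  | cons x l ih =>
    intro a h
    by_cases hx : P x = true
    · rw [List.find?_cons_of_pos hx] at h
      obtain rfl : x = a := by injection h
      exact ⟨[], l, by simp, by simp⟩
    · rw [List.find?_cons_of_neg (by simpa using hx)] at h
      obtain ⟨l1, l2, rfl, hf⟩ := ih a h
      refine ⟨x :: l1, l2, by simp, ?_⟩
      intro y hy
      rcases List.mem_cons.mp hy with rfl | hy'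
      · simpa using hx
      · exact hf y hy'

theorem scanB_nil : scanB [] = [] := by rw [scanB]

theorem scanB_cons_none (c : Char) (s : List Char)
    (h : pairsB.find? (fun p => p.1.isPrefixOf (c :: s)) = none) :
    scanB (c :: s) = c :: scanB s := by
  rw [scanB]
  split
  · next p heq => rw [h] at heq; cases heq
  · rfl

theorem scanB_cons_some (c : Char) (s : List Char) (p : List Char × List Char)
    (h : pairsB.find? (fun p => p.1.isPrefixOf (c :: s)) = some p) :
    scanB (c :: s) = p.2 ++ scanB ((c :: s).drop p.1.length) := by
  rw [scanB]
  split
  · next p' heq =>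
    rw [h] at heq
    obtain rfl : p = p' := by injection heq
    rfl
  · next heq => rw [h] at heq; cases heq

theorem main_lemma : ∀ (n : Nat) (s : List Char), s.length ≤ n →
    repFold s pairsB = scanB s := by
  intro n
  induction n with
  | zero =>
    intro s hs
    have hs0 : s = [] := by cases s with
      | nil => rfl
      | cons a b => simp at hs
    subst hs0
    rw [fold_nil, scanB_nil]
  | succ n ih =>
    intro s hs
    cases s with
    | nil => rw [fold_nil, scanB_nil]
    | cons c s' =>
      cases hf : pairsB.find? (fun p => p.1.isPrefixOf (c :: s')) with
      | none =>
        rw [scanB_cons_none c s' hf]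
        have hnone := List.find?_eq_none.mp hf
        rw [fold_head pairsB c s' (fun p hp =>
          ⟨pairsB_fst_ne_nil p hp, fact_lt_not_mem p hp, fact_w_head p hp,
            by simpa [List.isPrefixOf_iff_prefix] using hnone p hp⟩)]
        rw [ih s' (by simpa using Nat.le_of_succ_le_succ (by simpa using hs))]
      | some p =>
        obtain ⟨l1, l2, hT, hskip⟩ := find?_split _ pairsB p hf
        have hpmem : p ∈ pairsB := List.mem_of_find?_eq_some hf
        have hpne : p.1 ≠ [] := pairsB_fst_ne_nil p hpmem
        have hpre : p.1 <+: (c :: s') := by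
          simpa [List.isPrefixOf_iff_prefix] using List.find?_some hf
        obtain ⟨Y, hY⟩ := hpre
        rw [scanB_cons_some c s' p hf]
        have hYdrop : (c :: s').drop p.1.length = Y := by rw [← hY, List.drop_left]
        have hYlen : Y.length ≤ n := by
          have h1 : p.1.length + Y.length = s'.length + 1 := by
            have := congrArg List.length hY
            simpa using this
          have h2 : 0 < p.1.length := List.length_pos_iff.mpr hpne
          have h3 : s'.length + 1 ≤ n + 1 := by simpa using hs
          omega
        -- facts for the passes before p
        have hyp1 : ∀ q ∈ l1, q.1 ≠ [] ∧ ∀ k, k < p.1.length →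
            ¬ q.1 <+: p.1.drop k ∧ ¬ p.1.drop k <+: q.1 := by
          intro q hq
          have hqmem : q ∈ pairsB := by rw [hT]; exact List.mem_append_left _ hq
          have hqskip : ¬ q.1 <+: (c :: s') := fun hcontra =>
            absurd (List.isPrefixOf_iff_prefix.mpr hcontra) (by simp [hskip q hq])
          refine ⟨pairsB_fst_ne_nil q hqmem, fun k hk => ?_⟩
          rcases Nat.eq_zero_or_pos k with rfl | hkpos
          · simp only [List.drop_zero]
            constructor
            · intro hqp
              exact hqskip (hqp.trans ⟨Y, hY⟩)
            · intro hpq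
              have := fact_prefix_free p hpmem q hqmem hpq
              exact hqskip (this ▸ ⟨Y, hY⟩)
          · exact fact_overlap q hqmem p hpmem k (List.mem_range.mpr hk) hkpos
        -- facts for the passes after p
        have hyp2 : ∀ q ∈ l2, q.1 ≠ [] ∧ ∀ k, k < p.2.length →
            ¬ q.1 <+: p.2.drop k ∧ ¬ p.2.drop k <+: q.1 := by
          intro q hq
          have hqmem : q ∈ pairsB := by
            rw [hT]; exact List.mem_append_right _ (List.mem_cons_of_mem _ hq)
          have hnd := fact_nodup
          rw [hT] at hnd
          have hq1 : q.1 ≠ p.1 := by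
            simp only [List.map_append, List.map_cons, List.nodup_append] at hnd
            obtain ⟨-, hnd2, -⟩ := hnd
            have hp1 := (List.pairwise_cons.mp hnd2).1
            exact fun hcontra => hp1 q.1 (List.mem_map_of_mem hq) hcontra.symm
          exact ⟨pairsB_fst_ne_nil q hqmem, fun k hk =>
            fact_wrap q hqmem p hpmem hq1 k (List.mem_range.mpr hk)⟩
        calc repFold (c :: s') pairsB
            = repFold (p.1 ++ Y) (l1 ++ p :: l2) := by rw [hY, hT]
          _ = repFold (repFold (p.1 ++ Y) l1) (p :: l2) := repFold_append _ _ _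
          _ = repFold (p.1 ++ repFold Y l1) (p :: l2) := by
              rw [fold_segment l1 p.1 Y hyp1]
          _ = repFold (rep p.1 p.2 (p.1 ++ repFold Y l1)) l2 := repFold_cons _ _ _
          _ = repFold (p.2 ++ rep p.1 p.2 (repFold Y l1)) l2 := by
              rw [rep_head_match p.1 p.2 _ hpne]
          _ = p.2 ++ repFold (rep p.1 p.2 (repFold Y l1)) l2 :=
              fold_segment l2 p.2 _ hyp2
          _ = p.2 ++ repFold Y pairsB := by
              rw [hT, repFold_append, repFold_cons]
          _ = p.2 ++ scanB ((c :: s').drop p.1.length) := by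
              rw [ih Y hYlen, hYdrop]

theorem fold_str (ms : List (String × String)) (h : ∀ p ∈ ms, p.1 ≠ "") :
    ∀ html : String,
    (List.foldl
      (fun h p => PySem.Str.replace h p.1 ("<abbr title=\"" ++ p.2 ++ "\">" ++ p.1 ++ "</abbr>"))
      html ms).toList
    = repFold html.toList
        (ms.map (fun p => (p.1.toList, ("<abbr title=\"" ++ p.2 ++ "\">" ++ p.1 ++ "</abbr>").toList))) := by
  induction ms with
  | nil => intro html; simp [repFold]
  | cons q ms ih =>
    intro html
    have hq : q.1.toList ≠ [] := by
      intro hnil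
      have hqe : q.1.toList = "".toList := by simpa using hnil
      exact h q (List.mem_cons_self ..) (String.toList_inj.mp hqe)
    rw [List.foldl_cons, ih (fun p hp => h p (List.mem_cons_of_mem _ hp)),
        List.map_cons, repFold_cons]
    congr 1
    rw [PySem.Str.toList_replace, replace_eq_rep _ _ _ hq]

-- ===== VERDICT (by name: the statement is the Claim_ definition above) =====
theorem add_explanations_spec : Claim_equal_add_explanations := by
  intro html _
  unfold Spec_add_explanations add_explanations_alt
  have hA : (add_explanations html).toList = repFold html.toList pairsB := by
    have h1 := fold_str abbrMappingsA (by decide) html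
    have h2 : abbrMappingsA.map
        (fun p => (p.1.toList, ("<abbr title=\"" ++ p.2 ++ "\">" ++ p.1 ++ "</abbr>").toList))
        = pairsB := by decide
    rw [add_explanations, h1, h2]
  have hB : repFold html.toList pairsB = scanB html.toList :=
    main_lemma html.toList.length html.toList le_rfl
  have hAB : (add_explanations html).toList = scanB html.toList := hA.trans hB
  calc add_explanations html = String.ofList (add_explanations html).toList := by
        simp [String.ofList]
    _ = String.ofList (scanB html.toList) := by rw [hAB]
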